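-- pv_equiv track=rewrite | github.com/Xupai2022/html2pptx | src/utils/font_manager.py | _split_font_family
-- ===== SOURCE A (Python) =====
-- from typing import Optional, List
--
-- def _split_font_family(font_family_str: str) -> List[str]:
--     """
--     分割font-family字符串为字体列表
--
--     支持：
--     - "Font One", "Font Two", sans-serif
--     - 'Font One', 'Font Two'
--     - Font One, Font Two
--
--     Args:
--         font_family_str: font-family字符串
--
--     Returns:
--         字体名称列表
--     """
--     fonts = []
--     current_font = []
--     in_quotes = False
--     quote_char = None
--
--     for char in font_family_str:
--         if char in ('"', "'"):
--             if not in_quotes: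
--                 in_quotes = True
--                 quote_char = char
--             elif char == quote_char:
--                 in_quotes = False
--                 quote_char = None
--         elif char == ',' and not in_quotes:
--             font = ''.join(current_font).strip()
--             if font:
--                 fonts.append(font)
--             current_font = []
--             continue
--
--         current_font.append(char)
--
--     # 添加最后一个字体
--     font = ''.join(current_font).strip()
--     if font:
--         fonts.append(font)
--
--     return fonts
-- ===== SOURCE B (Python) =====
-- from typing import List
--
--
-- def _split_font_family(font_family_str: str) -> List[str]:
--     """Split a font-family string on top-level (unquoted) commas.
--
--     Recursive decomposition: find the first unquoted comma, cut the string
--     there, and recurse on the remainder; finally strip each piece and keep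
--     the non-empty ones.
--     """
--
--     def segments(chars: str) -> List[str]:
--         in_quotes = False
--         quote_char = None
--         for j, ch in enumerate(chars):
--             if ch in ('"', "'"):
--                 if not in_quotes:
--                     in_quotes = True
--                     quote_char = ch
--                 elif ch == quote_char:
--                     in_quotes = False
--                     quote_char = None
--             elif ch == ',' and not in_quotes:
--                 return [chars[:j]] + segments(chars[j + 1:])
--         return [chars]
--
--     return [f for f in (seg.strip() for seg in segments(font_family_str)) if f]
-- ===== Notes on version B (the rewrite author's own statement) =====
-- stated objective: alternative
-- what changed: A folds over every character with a growing current-font accumulator and mutable result list; B recursively finds the first unquoted comma, cuts the string there and recurses on the tail, then strips/filters the segments in one comprehension.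
import Mathlib
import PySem

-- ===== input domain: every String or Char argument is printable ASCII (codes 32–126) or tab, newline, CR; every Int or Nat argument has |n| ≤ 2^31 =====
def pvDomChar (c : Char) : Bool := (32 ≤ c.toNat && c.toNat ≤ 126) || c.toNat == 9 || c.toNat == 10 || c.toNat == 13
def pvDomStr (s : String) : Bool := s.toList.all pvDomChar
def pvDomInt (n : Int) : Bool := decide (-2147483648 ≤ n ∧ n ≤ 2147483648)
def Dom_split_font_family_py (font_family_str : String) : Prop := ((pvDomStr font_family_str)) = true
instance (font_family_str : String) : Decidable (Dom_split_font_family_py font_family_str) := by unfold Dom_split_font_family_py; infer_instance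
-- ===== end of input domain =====

-- B replaces A's single accumulator fold by a recursive cut-at-first-unquoted-comma
-- decomposition (alternative structure, same cost); return values proved equal on Dom.


-- ===== PORT A =====
-- one step of A's for-loop; state = (fonts, current_font, in_quotes, quote_char)
def pvStepA (st : List String × List Char × Bool × Option Char) (c : Char) :
    List String × List Char × Bool × Option Char :=
  let (fonts, cur, inQ, qc) := st
  if c = '"' ∨ c = '\'' then
    if ¬inQ then (fonts, cur ++ [c], true, some c)
    else if some c = qc then (fonts, cur ++ [c], false, none)
    else (fonts, cur ++ [c], inQ, qc)
  else if c = ',' ∧ inQ = false then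
    let font := PySem.Str.strip (String.mk cur)
    (if font ≠ "" then fonts ++ [font] else fonts, [], inQ, qc)
  else (fonts, cur ++ [c], inQ, qc)

def split_font_family_py (font_family_str : String) : List String :=
  let st := font_family_str.toList.foldl pvStepA ([], [], false, none)
  let font := PySem.Str.strip (String.mk st.2.1)
  if font ≠ "" then st.1 ++ [font] else st.1

-- ===== PORT B =====
-- B's inner scan: walk to the first unquoted comma; return (chars before it, some rest-after-it),
-- or (all chars, none) if there is none — chars[:j] built as the scan walks.
def pvTakeSeg : List Char → Bool → Option Char → List Char × Option (List Char)
  | [], _, _ => ([], none)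
  | c :: cs, inQ, qc =>
    if c = '"' ∨ c = '\'' then
      let st : Bool × Option Char :=
        if ¬inQ then (true, some c)
        else if some c = qc then (false, none)
        else (inQ, qc)
      let r := pvTakeSeg cs st.1 st.2
      (c :: r.1, r.2)
    else if c = ',' ∧ inQ = false then ([], some cs)
    else
      let r := pvTakeSeg cs inQ qc
      (c :: r.1, r.2)

theorem pvTakeSeg_rest_length :
    ∀ (l : List Char) (b : Bool) (q : Option Char) (rest : List Char),
      (pvTakeSeg l b q).2 = some rest → rest.length < l.length := by
  intro l
  induction l with
  | nil => intro b q rest h; simp [pvTakeSeg] at h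
  | cons c cs ih =>
    intro b q rest h
    simp only [pvTakeSeg] at h
    split at h
    · exact Nat.lt_succ_of_lt (ih _ _ _ h)
    · split at h
      · simp only [Option.some.injEq] at h
        subst h; simp
      · exact Nat.lt_succ_of_lt (ih _ _ _ h)

-- B's recursion: first segment, then recurse on the rest after the comma.
def pvSegments (l : List Char) : List (List Char) :=
  match h : pvTakeSeg l false none with
  | (seg, none) => [seg]
  | (_, some rest) => (pvTakeSeg l false none).1 :: pvSegments rest
termination_by l.length
decreasing_by exact pvTakeSeg_rest_length l false none rest (by rw [h])

def split_font_family_py_alt (font_family_str : String) : List String :=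
  ((pvSegments font_family_str.toList).map
      (fun seg => PySem.Str.strip (String.mk seg))).filter (· ≠ "")

-- ===== PRECONDITION & SPEC =====
def Spec_split_font_family_py (font_family_str : String) (out : List String) : Prop := out = split_font_family_py_alt font_family_str
instance (font_family_str : String) (out : List String) : Decidable (Spec_split_font_family_py font_family_str out) := by unfold Spec_split_font_family_py; infer_instance

-- ===== CLAIM (what is proved, stated in full; the proofs are below) =====
def Claim_equal_split_font_family_py : Prop := ∀ (font_family_str : String), Dom_split_font_family_py font_family_str → Spec_split_font_family_py font_family_str (split_font_family_py font_family_str)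

-- ===== LEMMAS AND PROOFS =====

-- the strip-and-keep-if-nonempty step, as a list
def pvFlush (cur : List Char) : List String :=
  if PySem.Str.strip (String.mk cur) ≠ "" then [PySem.Str.strip (String.mk cur)] else []

-- B's post-processing is the flatMap of pvFlush
theorem pvFilterMap_eq (segs : List (List Char)) :
    ((segs.map (fun seg => PySem.Str.strip (String.mk seg))).filter (· ≠ "")) =
      segs.flatMap pvFlush := by
  induction segs with
  | nil => rfl
  | cons s rest ih =>
    by_cases h : PySem.Str.strip (String.mk s) = ""
    · simp only [List.map_cons, List.filter_cons, List.flatMap_cons, pvFlush, h]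
      simpa using ih
    · have hT : (PySem.Str.strip (String.mk s) ≠ "") = True := by simp [h]
      simp only [List.map_cons, List.filter_cons, List.flatMap_cons, pvFlush, hT,
        decide_true, if_true, List.cons_append, List.nil_append]
      exact congrArg _ ih

def pvFinish (st : List String × List Char × Bool × Option Char) : List String :=
  st.1 ++ pvFlush st.2.1

-- A's loop read through pvTakeSeg: with the reachable-state invariant
-- (¬in_quotes → quote_char = none), the loop either finishes inside the current
-- segment, or reaches the comma pvTakeSeg finds and restarts from ([], false, none).
theorem pvLoop_takeSeg :
    ∀ (l : List Char) (inQ : Bool) (qc : Option Char), (inQ = false → qc = none) →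
      ∀ (fonts : List String) (cur : List Char),
        pvFinish (l.foldl pvStepA (fonts, cur, inQ, qc)) =
          (match pvTakeSeg l inQ qc with
           | (seg, none) => fonts ++ pvFlush (cur ++ seg)
           | (seg, some rest) =>
               pvFinish (rest.foldl pvStepA (fonts ++ pvFlush (cur ++ seg), [], false, none))) := by
  intro l
  induction l with
  | nil =>
    intro inQ qc _ fonts cur
    simp [pvTakeSeg, pvFinish]
  | cons c cs ih =>
    intro inQ qc hinv fonts cur
    rw [List.foldl_cons]
    by_cases hq : c = '"' ∨ c = '\''
    · by_cases hiq : inQ = false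
      · subst hiq
        have hstep : pvStepA (fonts, cur, false, qc) c = (fonts, cur ++ [c], true, some c) := by
          simp [pvStepA, hq]
        have htk : pvTakeSeg (c :: cs) false qc =
            (c :: (pvTakeSeg cs true (some c)).1, (pvTakeSeg cs true (some c)).2) := by
          simp [pvTakeSeg, hq]
        rw [hstep, ih true (some c) (by simp) fonts (cur ++ [c]), htk]
        rcases h : pvTakeSeg cs true (some c) with ⟨seg, r⟩
        cases r <;> simp [List.append_assoc]
      · have hiq' : inQ = true := by revert hiq; cases inQ <;> simp
        subst hiq'
        by_cases hqc : some c = qc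
        · have hstep : pvStepA (fonts, cur, true, qc) c = (fonts, cur ++ [c], false, none) := by
            simp [pvStepA, hq, hqc]
          have htk : pvTakeSeg (c :: cs) true qc =
              (c :: (pvTakeSeg cs false none).1, (pvTakeSeg cs false none).2) := by
            simp [pvTakeSeg, hq, hqc]
          rw [hstep, ih false none (by simp) fonts (cur ++ [c]), htk]
          rcases h : pvTakeSeg cs false none with ⟨seg, r⟩
          cases r <;> simp [List.append_assoc]
        · have hstep : pvStepA (fonts, cur, true, qc) c = (fonts, cur ++ [c], true, qc) := by
            simp [pvStepA, hq, hqc]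
          have htk : pvTakeSeg (c :: cs) true qc =
              (c :: (pvTakeSeg cs true qc).1, (pvTakeSeg cs true qc).2) := by
            simp [pvTakeSeg, hq, hqc]
          rw [hstep, ih true qc (by simp) fonts (cur ++ [c]), htk]
          rcases h : pvTakeSeg cs true qc with ⟨seg, r⟩
          cases r <;> simp [List.append_assoc]
    · by_cases hc : c = ',' ∧ inQ = false
      · have hqcn : qc = none := hinv hc.2
        subst hqcn
        obtain ⟨hc1, hc2⟩ := hc
        subst hc2
        subst hc1
        have hstep : pvStepA (fonts, cur, false, none) ',' = (fonts ++ pvFlush cur, [], false, none) := by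
          simp [pvStepA, pvFlush]
          split_ifs <;> simp_all
        have htk : pvTakeSeg (',' :: cs) false none = ([], some cs) := by
          simp [pvTakeSeg]
        rw [hstep, htk]
        simp
      · have hstep : pvStepA (fonts, cur, inQ, qc) c = (fonts, cur ++ [c], inQ, qc) := by
          simp [pvStepA, hq, hc]
        have htk : pvTakeSeg (c :: cs) inQ qc =
            (c :: (pvTakeSeg cs inQ qc).1, (pvTakeSeg cs inQ qc).2) := by
          simp only [pvTakeSeg, if_neg hq, if_neg hc]
        rw [hstep, ih inQ qc hinv fonts (cur ++ [c]), htk]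
        rcases h : pvTakeSeg cs inQ qc with ⟨seg, r⟩
        cases r <;> simp [List.append_assoc]

-- glue cur onto the first segment
def pvConsFirst (cur : List Char) : List (List Char) → List (List Char)
  | [] => [cur]
  | s :: r => (cur ++ s) :: r

theorem pvSegments_ne_nil (l : List Char) : pvSegments l ≠ [] := by
  rw [pvSegments]
  split <;> simp

theorem pvSegments_eq_single (l seg : List Char)
    (h : pvTakeSeg l false none = (seg, none)) : pvSegments l = [seg] := by
  rw [pvSegments]
  split
  · next seg' h' =>
    rw [h] at h'
    injection h' with h1 _
    rw [h1]
  · next seg' rest' h' =>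
    rw [h] at h'
    exact absurd h' (by simp)

theorem pvSegments_eq_cons (l seg rest : List Char)
    (h : pvTakeSeg l false none = (seg, some rest)) :
    pvSegments l = seg :: pvSegments rest := by
  rw [pvSegments]
  split
  · next seg' h' =>
    rw [h] at h'
    exact absurd h' (by simp)
  · next seg' rest' h' =>
    rw [h] at h'
    injection h' with h1 h2
    injection h2 with h2
    subst h2
    rw [h]

theorem pvMain (l : List Char) :
    ∀ (fonts : List String) (cur : List Char),
      pvFinish (l.foldl pvStepA (fonts, cur, false, none)) =
        fonts ++ (pvConsFirst cur (pvSegments l)).flatMap pvFlush := by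
  induction l using pvSegments.induct with
  | case1 l seg h =>
    intro fonts cur
    rw [pvLoop_takeSeg l false none (by simp) fonts cur, h]
    show fonts ++ pvFlush (cur ++ seg) =
      fonts ++ (pvConsFirst cur (pvSegments l)).flatMap pvFlush
    rw [pvSegments_eq_single l seg h]
    simp [pvConsFirst]
  | case2 l seg rest h ih =>
    intro fonts cur
    rw [pvLoop_takeSeg l false none (by simp) fonts cur, h]
    show pvFinish (rest.foldl pvStepA (fonts ++ pvFlush (cur ++ seg), [], false, none)) =
      fonts ++ (pvConsFirst cur (pvSegments l)).flatMap pvFlush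
    rw [ih (fonts ++ pvFlush (cur ++ seg)) [], pvSegments_eq_cons l seg rest h]
    rcases hsr : pvSegments rest with _ | ⟨x, r⟩
    · exact absurd hsr (pvSegments_ne_nil rest)
    · simp [pvConsFirst, List.append_assoc]

-- ===== VERDICT (by name: the statement is the Claim_ definition above) =====
theorem split_font_family_py_spec : Claim_equal_split_font_family_py := by
  intro s _
  unfold Spec_split_font_family_py split_font_family_py split_font_family_py_alt
  have hA : (let st := s.toList.foldl pvStepA ([], [], false, none)
      let font := PySem.Str.strip (String.mk st.2.1)
      if font ≠ "" then st.1 ++ [font] else st.1) =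
      pvFinish (s.toList.foldl pvStepA ([], [], false, none)) := by
    simp only [pvFinish, pvFlush]
    split_ifs <;> simp
  rw [hA, pvMain s.toList [] [], pvFilterMap_eq]
  rcases hsr : pvSegments s.toList with _ | ⟨x, r⟩
  · exact absurd hsr (pvSegments_ne_nil s.toList)
  · simp [pvConsFirst]
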